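-- pv_equiv track=rewrite | github.com/mirraman/ribo-switch-design | ribo_switch/verify.py | bp_distance_from_tables
-- ===== SOURCE A (Python) =====
-- def bp_distance_from_tables(
--     pt_pred: list[int],
--     pt_target: list[int],
-- ) -> int:
--
--     n = len(pt_pred)
--     assert len(pt_target) == n, "pair tables must have the same length"
--     dist = 0
--     for i in range(n):
--         p = pt_pred[i]
--         t = pt_target[i]
--         if i < p and i < t:
--             if p != t:
--                 dist += 2
--         elif i < p:
--             dist += 1
--         elif i < t:
--             dist += 1
--     return dist
-- ===== SOURCE B (Python) =====
-- def bp_distance_from_tables(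
--     pt_pred: list[int],
--     pt_target: list[int],
-- ) -> int:
--     n = len(pt_pred)
--     assert len(pt_target) == n, "pair tables must have the same length"
--     s_pred = {(i, p) for i, p in enumerate(pt_pred) if i < p}
--     s_target = {(i, t) for i, t in enumerate(pt_target) if i < t}
--     return len(s_pred ^ s_target)
-- ===== Notes on version B (the rewrite author's own statement) =====
-- stated objective: idiomatic
-- what changed: Replaces the per-index four-way branch cascade with building the two sets of base pairs {(i, partner) : i < partner} and returning the size of their symmetric difference.
import Mathlib
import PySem

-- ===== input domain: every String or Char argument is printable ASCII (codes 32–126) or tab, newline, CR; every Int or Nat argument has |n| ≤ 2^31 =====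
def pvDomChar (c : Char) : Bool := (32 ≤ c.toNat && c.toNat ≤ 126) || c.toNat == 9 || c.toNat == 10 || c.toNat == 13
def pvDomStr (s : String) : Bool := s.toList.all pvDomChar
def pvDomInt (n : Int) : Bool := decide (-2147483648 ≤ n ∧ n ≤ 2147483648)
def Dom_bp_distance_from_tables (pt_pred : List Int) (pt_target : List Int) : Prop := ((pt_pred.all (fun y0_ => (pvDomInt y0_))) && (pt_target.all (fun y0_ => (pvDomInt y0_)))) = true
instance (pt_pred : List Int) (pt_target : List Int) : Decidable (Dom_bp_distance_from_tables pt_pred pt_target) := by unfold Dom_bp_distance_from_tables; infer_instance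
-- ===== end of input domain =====

-- B builds the two sets of base pairs {(i, partner) : i < partner} and returns the size of
-- their symmetric difference, replacing A's per-index branch cascade (objective: idiomatic).


-- ===== PORT A =====
def bp_distance_from_tables (pt_pred : List Int) (pt_target : List Int) : Int :=
  let n : Int := pt_pred.length
  (PySem.List.pyRange 0 n 1).foldl (fun dist i =>
    let p := PySem.List.pyGetD pt_pred i 0
    let t := PySem.List.pyGetD pt_target i 0
    if i < p ∧ i < t then (if p ≠ t then dist + 2 else dist)
    else if i < p then dist + 1
    else if i < t then dist + 1
    else dist) 0

-- ===== PORT B =====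
def bp_distance_from_tables_alt (pt_pred : List Int) (pt_target : List Int) : Int :=
  let s_pred : PySem.Set (Int × Int) :=
    PySem.Set.ofList ((PySem.List.enumerate pt_pred).filter (fun q => decide (q.1 < q.2)))
  let s_target : PySem.Set (Int × Int) :=
    PySem.Set.ofList ((PySem.List.enumerate pt_target).filter (fun q => decide (q.1 < q.2)))
  PySem.Set.len (PySem.Set.symmDiff s_pred s_target)

-- ===== PRECONDITION & SPEC =====
-- A asserts the two pair tables have equal length (AssertionError otherwise); Pre_ excludes exactly that.
def Pre_bp_distance_from_tables (pt_pred : List Int) (pt_target : List Int) : Prop :=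
  pt_target.length = pt_pred.length
instance (pt_pred : List Int) (pt_target : List Int) : Decidable (Pre_bp_distance_from_tables pt_pred pt_target) := by
  unfold Pre_bp_distance_from_tables; infer_instance

def pvWitness_bp_distance_from_tables : List Int × List Int := ([3, -1, 5, 0], [3, -1, 0, 0])

def Spec_bp_distance_from_tables (pt_pred : List Int) (pt_target : List Int) (out : Int) : Prop := out = bp_distance_from_tables_alt pt_pred pt_target
instance (pt_pred : List Int) (pt_target : List Int) (out : Int) : Decidable (Spec_bp_distance_from_tables pt_pred pt_target out) := by unfold Spec_bp_distance_from_tables; infer_instance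

-- ===== CLAIM (what is proved, stated in full; the proofs are below) =====
def Claim_equal_bp_distance_from_tables : Prop := ∀ (pt_pred : List Int) (pt_target : List Int), Dom_bp_distance_from_tables pt_pred pt_target → Pre_bp_distance_from_tables pt_pred pt_target → Spec_bp_distance_from_tables pt_pred pt_target (bp_distance_from_tables pt_pred pt_target)

-- ===== LEMMAS AND PROOFS =====

-- the (Nodup) list of kept pairs of B's set comprehension
def spSet (xs : List Int) : List (Int × Int) :=
  (PySem.List.enumerate xs).filter (fun q => decide (q.1 < q.2))

-- per-index contribution of A's loop body
def pvContrib (xs ys : List Int) (k : Nat) : Int :=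
  let p := xs.getD k 0
  let t := ys.getD k 0
  if (k : Int) < p ∧ (k : Int) < t then (if p ≠ t then 2 else 0)
  else if (k : Int) < p then 1
  else if (k : Int) < t then 1
  else 0

lemma nodup_spSet (xs : List Int) : (spSet xs).Nodup := by
  have h := (PySem.List.pairwise_lt_enumerate xs 0).filter (fun q => decide (q.1 < q.2))
  exact h.imp (fun hlt he => by subst he; exact lt_irrefl _ hlt)

lemma mem_spSet (ys : List Int) (q : Int × Int) :
    q ∈ spSet ys ↔ ∃ m : Nat, m < ys.length ∧ q = ((m : Int), ys.getD m 0) ∧ (m : Int) < ys.getD m 0 := by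
  unfold spSet
  simp only [List.mem_filter, PySem.List.mem_enumerate_iff, decide_eq_true_eq]
  constructor
  · rintro ⟨⟨k, hk, rfl⟩, hlt⟩
    refine ⟨k, hk, by simp [List.getD_eq_getElem?_getD, List.getElem?_eq_getElem hk], ?_⟩
    simpa [List.getD_eq_getElem?_getD, List.getElem?_eq_getElem hk] using hlt
  · rintro ⟨m, hm, rfl, hlt⟩
    exact ⟨⟨m, hm, by simp [List.getD_eq_getElem?_getD, List.getElem?_eq_getElem hm]⟩,
      by simpa [List.getD_eq_getElem?_getD, List.getElem?_eq_getElem hm] using hlt⟩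

lemma countP_spSet (xs : List Int) (P : Int × Int → Bool) :
    (spSet xs).countP P
      = (List.range xs.length).countP
          (fun (k : Nat) => P ((k : Int), xs.getD k 0) && decide ((k : Int) < xs.getD k 0)) := by
  unfold spSet
  rw [List.countP_filter, PySem.List.enumerate_eq_map_pyRange xs 0, List.countP_map]
  have hlen : PySem.List.pyRange 0 (PySem.List.len xs) = PySem.List.pyRange 0 ((xs.length : Nat) : Int) := by
    simp [PySem.List.len]
  rw [hlen, PySem.List.pyRange_zero_nat, List.countP_map]
  refine List.countP_congr ?_
  intro k _
  simp [PySem.List.pyGetD_natCast]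

lemma alt_eq (xs ys : List Int) :
    bp_distance_from_tables_alt xs ys
      = ((spSet xs).countP (fun q => !(spSet ys).contains q) : Int)
        + ((spSet ys).countP (fun q => !(spSet xs).contains q) : Int) := by
  unfold bp_distance_from_tables_alt
  rw [show ((PySem.List.enumerate xs).filter (fun q => decide (q.1 < q.2))) = spSet xs from rfl,
      show ((PySem.List.enumerate ys).filter (fun q => decide (q.1 < q.2))) = spSet ys from rfl,
      PySem.Set.ofList_eq_self_of_nodup _ (nodup_spSet xs),
      PySem.Set.ofList_eq_self_of_nodup _ (nodup_spSet ys)]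
  simp [PySem.Set.symmDiff, PySem.Set.diff, PySem.Set.len, List.countP_eq_length_filter]

lemma A_eq (xs ys : List Int) :
    bp_distance_from_tables xs ys = ((List.range xs.length).map (pvContrib xs ys)).sum := by
  simp only [bp_distance_from_tables]
  rw [PySem.List.pyRange_zero_nat, List.foldl_map]
  have hfun : (fun (dist : Int) (k : Nat) =>
      let p := PySem.List.pyGetD xs ((k : Nat) : Int) 0
      let t := PySem.List.pyGetD ys ((k : Nat) : Int) 0
      if ((k : Nat) : Int) < p ∧ ((k : Nat) : Int) < t then (if p ≠ t then dist + 2 else dist)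
      else if ((k : Nat) : Int) < p then dist + 1
      else if ((k : Nat) : Int) < t then dist + 1
      else dist)
      = fun dist k => dist + pvContrib xs ys k := by
    funext dist k
    simp only [PySem.List.pyGetD_natCast, pvContrib]
    split_ifs <;> ring
  rw [hfun, PySem.List.foldl_add]
  ring

lemma contains_spSet (ys : List Int) (k : Nat) (hk : k < ys.length) (v : Int) :
    ((spSet ys).contains ((k : Int), v) = true) ↔ (v = ys.getD k 0 ∧ (k : Int) < v) := by
  rw [List.contains_iff_mem, mem_spSet]
  constructor
  · rintro ⟨m, hm, hEq, hlt⟩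
    have h1 : (k : Int) = (m : Int) := (Prod.mk.injEq ..).mp hEq |>.1
    have h2 : v = ys.getD m 0 := (Prod.mk.injEq ..).mp hEq |>.2
    have : m = k := by omega
    subst this
    exact ⟨h2, h2 ▸ hlt⟩
  · rintro ⟨rfl, hlt⟩
    exact ⟨k, hk, rfl, hlt⟩

lemma sum_contrib (xs ys : List Int) (h : ys.length = xs.length) :
    ((List.range xs.length).map (pvContrib xs ys)).sum
      = ((List.range xs.length).countP
          (fun (k : Nat) => (!(spSet ys).contains ((k : Int), xs.getD k 0)) && decide ((k : Int) < xs.getD k 0)) : Int)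
        + ((List.range xs.length).countP
          (fun (k : Nat) => (!(spSet xs).contains ((k : Int), ys.getD k 0)) && decide ((k : Int) < ys.getD k 0)) : Int) := by
  rw [← PySem.List.sum_map_ite_one_zero
        (fun (k : Nat) => (!(spSet ys).contains ((k : Int), xs.getD k 0)) && decide ((k : Int) < xs.getD k 0)),
      ← PySem.List.sum_map_ite_one_zero
        (fun (k : Nat) => (!(spSet xs).contains ((k : Int), ys.getD k 0)) && decide ((k : Int) < ys.getD k 0)),
      ← PySem.List.sum_map_add_int]
  refine congrArg List.sum (List.map_congr_left ?_)
  intro k hk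
  have hkx : k < xs.length := List.mem_range.mp hk
  have hky : k < ys.length := by omega
  have hcy := contains_spSet ys k hky (xs.getD k 0)
  have hcx := contains_spSet xs k hkx (ys.getD k 0)
  simp only [pvContrib, Bool.and_eq_true, Bool.not_eq_true', Bool.eq_false_iff, Ne,
    hcx, hcy, decide_eq_true_eq]
  split_ifs <;> omega

-- ===== VERDICT (by name: the statement is the Claim_ definition above) =====
theorem bp_distance_from_tables_spec : Claim_equal_bp_distance_from_tables := by
  intro xs ys _ hpre
  unfold Spec_bp_distance_from_tables
  rw [A_eq, alt_eq, countP_spSet, countP_spSet, hpre, sum_contrib xs ys hpre]
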